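-- pv_equiv track=rewrite | github.com/sup-saanvi/enigma_game | practice3.py | enigma_keyword_encrypt
-- ===== SOURCE A (Python) =====
-- import string
--
-- ALPHABET = string.ascii_uppercase
--
-- def generate_keyword_alphabet(keyword):
--     keyword = "".join(dict.fromkeys(keyword.upper()))  # remove duplicates
--     remaining = "".join([c for c in ALPHABET if c not in keyword])
--     return keyword + remaining
--
-- def apply_plugboard(text, swaps):
--     mapping = {c: c for c in ALPHABET}
--     for a, b in swaps:
--         mapping[a] = b
--         mapping[b] = a
--     return "".join(mapping.get(c, c) for c in text)
--
-- def shift_alphabet(alphabet, shift):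
--     shift %= 26
--     return alphabet[shift:] + alphabet[:shift]
--
-- def enigma_keyword_encrypt(text, keyword, swaps=None):
--     if swaps is None:
--         swaps = []
--
--     text = text.upper().replace(" ", "")
--     base_alpha = generate_keyword_alphabet(keyword)
--     result = []
--     shift = 0
--
--     for ch in text:
--         if ch not in ALPHABET:
--             result.append(ch)
--             continue
--
--         # plugboard in
--         ch = apply_plugboard(ch, swaps)
--
--         # rotor-like shift
--         shifted_alpha = shift_alphabet(base_alpha, shift)
--
--         # substitution
--         idx = ALPHABET.index(ch)
--         enc = shifted_alpha[idx]
--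
--         # plugboard out
--         enc = apply_plugboard(enc, swaps)
--
--         result.append(enc)
--
--         # rotor steps
--         shift += 1
--
--     return "".join(result)
-- ===== SOURCE B (Python) =====
-- import string
--
-- ALPHABET = string.ascii_uppercase
--
-- def enigma_keyword_encrypt(text, keyword, swaps=None):
--     cleaned = text.upper().replace(" ", "")
--
--     # keyword alphabet: ordered dedup of the keyword, then the unused letters
--     seen = []
--     for c in keyword.upper():
--         if c not in seen:
--             seen.append(c)
--     base = seen + [c for c in ALPHABET if c not in seen]
--     L = len(base)
--
--     # plugboard as a dict built once (last pair mentioning a symbol wins)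
--     plug = {}
--     for a, b in (swaps or []):
--         plug[a] = b
--         plug[b] = a
--
--     # pass 1: the alphabet letters of the cleaned text, in order
--     letters = [c for c in cleaned if c in ALPHABET]
--
--     # pass 2: the k-th such letter is encrypted with rotor shift k
--     buf = []
--     for k, ch in enumerate(letters):
--         p = plug.get(ch, ch)
--         idx = ALPHABET.index(p)
--         e = base[(idx + k % 26) % L]
--         buf.append(plug.get(e, e))
--
--     # pass 3: merge the encrypted letters back between the other characters
--     out = []
--     i = 0
--     for c in cleaned:
--         if c in ALPHABET:
--             out.append(buf[i])
--             i += 1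
--         else:
--             out.append(c)
--     return "".join(out)
-- ===== Notes on version B (the rewrite author's own statement) =====
-- stated objective: faster
-- what changed: A rebuilds the 26-entry plugboard dict and a sliced rotated alphabet from scratch for every character; B builds the keyword alphabet and plugboard dict once, collects the alphabet letters in one pass, encrypts the k-th letter by the closed-form index (ALPHABET.index(plug(ch)) + k%26) % len(base), and merges the encrypted buffer back between the non-letters in a final pass.
import Mathlib
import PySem

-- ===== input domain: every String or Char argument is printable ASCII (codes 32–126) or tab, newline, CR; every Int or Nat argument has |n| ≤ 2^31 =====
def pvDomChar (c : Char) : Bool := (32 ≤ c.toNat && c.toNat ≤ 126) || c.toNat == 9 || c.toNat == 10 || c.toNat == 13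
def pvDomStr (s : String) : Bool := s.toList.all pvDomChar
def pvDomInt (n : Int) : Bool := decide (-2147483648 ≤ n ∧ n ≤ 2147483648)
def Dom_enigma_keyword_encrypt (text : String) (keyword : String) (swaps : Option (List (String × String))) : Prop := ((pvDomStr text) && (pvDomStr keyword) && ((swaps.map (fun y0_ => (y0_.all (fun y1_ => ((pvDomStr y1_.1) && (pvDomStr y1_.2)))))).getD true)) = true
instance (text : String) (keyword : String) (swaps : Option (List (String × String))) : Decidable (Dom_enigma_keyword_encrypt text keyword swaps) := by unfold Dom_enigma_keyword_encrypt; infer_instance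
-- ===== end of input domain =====

-- B builds the keyword alphabet and the plugboard dict ONCE (A rebuilds the dict and slices a
-- rotated alphabet for every character), encrypts the k-th letter by a closed-form modular index,
-- and merges the encrypted buffer back in a final pass (objective: faster; measured by the check).

-- ===== PORT A =====
def pvAlphaA : List Char := ['A','B','C','D','E','F','G','H','I','J','K','L','M','N','O','P','Q','R','S','T','U','V','W','X','Y','Z']

-- generate_keyword_alphabet
def pvAGenAlpha (keyword : String) : List Char :=
  let kw := PySem.List.dedup (PySem.Chars.upper keyword.toList)
  kw ++ pvAlphaA.filter (fun c => !(kw.contains c))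

-- mapping = {c: c for c in ALPHABET}; for a, b in swaps: mapping[a] = b; mapping[b] = a
def pvAPlugMap (swaps : List (String × String)) : PySem.Dict String (List Char) :=
  let m0 := pvAlphaA.foldl (fun d c => d.insert (String.ofList [c]) [c]) PySem.Dict.empty
  swaps.foldl (fun d p => (d.insert p.1 p.2.toList).insert p.2 p.1.toList) m0

-- apply_plugboard
def pvAApplyPlug (text : List Char) (swaps : List (String × String)) : List Char :=
  (text.map (fun c => (pvAPlugMap swaps).getD (String.ofList [c]) [c])).flatten

-- shift_alphabet
def pvAShiftAlpha (alphabet : List Char) (shift : Int) : List Char :=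
  let s := PySem.Int.mod shift 26
  PySem.List.slice alphabet (some s) none ++ PySem.List.slice alphabet none (some s)

-- the loop body of A; ALPHABET.index is PySem.Chars.find (−1 instead of ValueError, outside Pre_),
-- shifted_alpha[idx] is pyGet? with a default never used inside Pre_
def pvAStep (sw : List (String × String)) (base : List Char) (st : List (List Char) × Int) (ch : Char) : List (List Char) × Int :=
  if !(pvAlphaA.contains ch) then (st.1 ++ [[ch]], st.2)
  else
    let ch2 := pvAApplyPlug [ch] sw
    let shifted := pvAShiftAlpha base st.2
    let idx := PySem.Chars.find pvAlphaA ch2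
    let enc := (PySem.List.pyGet? shifted idx).getD 'A'
    let enc2 := pvAApplyPlug [enc] sw
    (st.1 ++ [enc2], st.2 + 1)

def enigma_keyword_encrypt (text : String) (keyword : String) (swaps : Option (List (String × String))) : String :=
  let sw := swaps.getD []
  let cleaned := PySem.Chars.replace (PySem.Chars.upper text.toList) [' '] []
  let base := pvAGenAlpha keyword
  let res := cleaned.foldl (pvAStep sw base) ([], 0)
  String.ofList (PySem.Chars.join [] res.1)

-- ===== PORT B =====
def pvAlphaB : List Char := ['A','B','C','D','E','F','G','H','I','J','K','L','M','N','O','P','Q','R','S','T','U','V','W','X','Y','Z']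

-- seen-loop ordered dedup of the uppercased keyword
def pvBSeen (keyword : String) : List Char :=
  (PySem.Chars.upper keyword.toList).foldl (fun seen c => if seen.contains c then seen else seen ++ [c]) []

def pvBBase (keyword : String) : List Char :=
  let seen := pvBSeen keyword
  seen ++ pvAlphaB.filter (fun c => !(seen.contains c))

-- plug = {}; for a, b in (swaps or []): plug[a] = b; plug[b] = a
def pvBPlug (swaps : List (String × String)) : PySem.Dict String (List Char) :=
  swaps.foldl (fun d p => (d.insert p.1 p.2.toList).insert p.2 p.1.toList) PySem.Dict.empty

-- encryption of the k-th alphabet letter ch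
def pvBEnc (plug : PySem.Dict String (List Char)) (base : List Char) (k : Nat) (ch : Char) : List Char :=
  let p := plug.getD (String.ofList [ch]) [ch]
  let idx := PySem.Chars.find pvAlphaB p
  let e := (PySem.List.pyGet? base (PySem.Int.mod (idx + PySem.Int.mod (k : Int) 26) (base.length : Int))).getD 'A'
  plug.getD (String.ofList [e]) [e]

-- final pass: next buffered encrypted letter for each alphabet char, others verbatim
def pvBMerge : List Char → List (List Char) → List (List Char)
  | [], _ => []
  | c :: cs, buf =>
    if pvAlphaB.contains c then buf.headD [] :: pvBMerge cs buf.tail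
    else [c] :: pvBMerge cs buf

def enigma_keyword_encrypt_alt (text : String) (keyword : String) (swaps : Option (List (String × String))) : String :=
  let cleaned := PySem.Chars.replace (PySem.Chars.upper text.toList) [' '] []
  let base := pvBBase keyword
  let plug := pvBPlug (swaps.getD [])
  let letters := cleaned.filter (fun c => pvAlphaB.contains c)
  let buf := letters.zipIdx.map (fun p => pvBEnc plug base p.2 p.1)
  String.ofList (PySem.Chars.join [] (pvBMerge cleaned buf))

-- ===== PRECONDITION & SPEC =====
def pvAlphaPre : List Char := ['A','B','C','D','E','F','G','H','I','J','K','L','M','N','O','P','Q','R','S','T','U','V','W','X','Y','Z']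

-- the plugboard image of a single character c: the last swap pair mentioning c, read crosswise
def pvPreImg (swaps : List (String × String)) (c : Char) : List Char :=
  swaps.foldl (fun acc p =>
    if p.2 = String.ofList [c] then p.1.toList
    else if p.1 = String.ofList [c] then p.2.toList else acc) [c]

-- Pre_ excludes exactly the inputs on which Python's A (and B) raise ValueError from
-- ALPHABET.index: a letter of the cleaned text whose plugboard image is not a substring of ALPHABET.
def Pre_enigma_keyword_encrypt (text : String) (keyword : String) (swaps : Option (List (String × String))) : Prop :=
  ((PySem.Chars.replace (PySem.Chars.upper text.toList) [' '] []).all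
    (fun c => !(pvAlphaPre.contains c)
      || PySem.Chars.isIn (pvPreImg (swaps.getD []) c) pvAlphaPre)) = true
instance (text : String) (keyword : String) (swaps : Option (List (String × String))) : Decidable (Pre_enigma_keyword_encrypt text keyword swaps) := by unfold Pre_enigma_keyword_encrypt; infer_instance

def pvWitness_enigma_keyword_encrypt : String × String × (Option (List (String × String))) :=
  ("AB 1", "K", some [("A", "B")])

def Spec_enigma_keyword_encrypt (text : String) (keyword : String) (swaps : Option (List (String × String))) (out : String) : Prop := out = enigma_keyword_encrypt_alt text keyword swaps
instance (text : String) (keyword : String) (swaps : Option (List (String × String))) (out : String) : Decidable (Spec_enigma_keyword_encrypt text keyword swaps out) := by unfold Spec_enigma_keyword_encrypt; infer_instance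

-- ===== CLAIM (what is proved, stated in full; the proofs are below) =====
def Claim_equal_enigma_keyword_encrypt : Prop := ∀ (text : String) (keyword : String) (swaps : Option (List (String × String))), Dom_enigma_keyword_encrypt text keyword swaps → Pre_enigma_keyword_encrypt text keyword swaps → Spec_enigma_keyword_encrypt text keyword swaps (enigma_keyword_encrypt text keyword swaps)

-- ===== LEMMAS AND PROOFS =====

-- the two plugboard-step folds share this insert-pair shape
theorem pv_getD_insert2 (d : PySem.Dict String (List Char)) (p : String × String) (s : String) (dflt : List Char) :
    ((d.insert p.1 p.2.toList).insert p.2 p.1.toList).getD s dflt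
      = if s = p.2 then p.1.toList else if s = p.1 then p.2.toList else d.getD s dflt := by
  rw [PySem.Dict.getD_insert, PySem.Dict.getD_insert]

-- a start dict that is neutral at s can be dropped from the swap fold
theorem pv_getD_fold (sw : List (String × String)) (d : PySem.Dict String (List Char)) (s : String) (dflt : List Char)
    (h : d.getD s dflt = dflt) :
    (sw.foldl (fun d p => (d.insert p.1 p.2.toList).insert p.2 p.1.toList) d).getD s dflt
      = (sw.foldl (fun d p => (d.insert p.1 p.2.toList).insert p.2 p.1.toList) PySem.Dict.empty).getD s dflt := by
  induction sw using List.reverseRecOn with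
  | nil => simpa [PySem.Dict.getD_empty] using h
  | append_singleton l p ih =>
    simp only [List.foldl_append, List.foldl_cons, List.foldl_nil, pv_getD_insert2]
    split_ifs <;> first | rfl | exact ih

-- A's identity initialisation is neutral at every single-character key
theorem pv_getD_id (l : List Char) (x : Char) :
    (l.foldl (fun d c => d.insert (String.ofList [c]) [c]) PySem.Dict.empty).getD (String.ofList [x]) [x] = [x] := by
  induction l using List.reverseRecOn with
  | nil => simp [PySem.Dict.getD_empty]
  | append_singleton l c ih =>
    simp only [List.foldl_append, List.foldl_cons, List.foldl_nil]
    rw [PySem.Dict.getD_insert]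
    split_ifs with h
    · have hx : [x] = [c] := String.ofList_injective h
      simp [hx]
    · exact ih

-- A's per-character apply_plugboard = one lookup in B's swaps-only dict
theorem pv_plug_eq (sw : List (String × String)) (x : Char) :
    pvAApplyPlug [x] sw = (pvBPlug sw).getD (String.ofList [x]) [x] := by
  show (pvAPlugMap sw).getD (String.ofList [x]) [x] ++ [] = _
  rw [List.append_nil]
  exact pv_getD_fold sw _ _ _ (pv_getD_id pvAlphaA x)

-- the crosswise scan of Pre_ computes the same plugboard image
theorem pv_preimg_eq (sw : List (String × String)) (c : Char) :
    pvPreImg sw c = (pvBPlug sw).getD (String.ofList [c]) [c] := by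
  induction sw using List.reverseRecOn with
  | nil => simp [pvPreImg, pvBPlug, PySem.Dict.getD_empty]
  | append_singleton l p ih =>
    simp only [pvPreImg, pvBPlug, List.foldl_append, List.foldl_cons, List.foldl_nil] at *
    rw [pv_getD_insert2]
    by_cases h2 : p.2 = String.ofList [c]
    · simp [h2]
    · by_cases h1 : p.1 = String.ofList [c]
      · simp [h1, h2, Ne.symm h2]
      · simp [h1, h2, Ne.symm h1, Ne.symm h2, ih]

-- the three alphabet constants coincide
theorem pv_alpha_ab : pvAlphaA = pvAlphaB := rfl
theorem pv_alpha_pb : pvAlphaPre = pvAlphaB := rfl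

-- the two keyword alphabets coincide (dedup IS the seen-loop)
theorem pv_base_eq (keyword : String) : pvAGenAlpha keyword = pvBBase keyword := rfl

-- the keyword alphabet contains all 26 letters, hence is at least 26 long
theorem pv_base_len (keyword : String) : 26 ≤ (pvBBase keyword).length := by
  have hsub : pvAlphaB ⊆ pvBBase keyword := by
    intro c hc
    by_cases h : (pvBSeen keyword).contains c
    · exact List.mem_append_left _ (by simpa using h)
    · refine List.mem_append_right _ ?_
      rw [List.mem_filter]
      exact ⟨hc, by simpa using h⟩
  have hnd : pvAlphaB.Nodup := by decide
  simpa using (hnd.subperm hsub).length_le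

-- rotating then indexing = indexing at the modular position
theorem pv_rot (l : List Char) (s i : Nat) (hs : s ≤ l.length) (hi : i < l.length) :
    (l.drop s ++ l.take s)[i]? = l[(s + i) % l.length]? := by
  rcases lt_or_ge i (l.length - s) with h | h
  · rw [List.getElem?_append_left (by simp [List.length_drop]; omega)]
    rw [List.getElem?_drop]
    congr 1
    exact (Nat.mod_eq_of_lt (by omega)).symm
  · rw [List.getElem?_append_right (by simp [List.length_drop]; omega)]
    rw [List.length_drop, List.getElem?_take_of_lt (by omega)]
    congr 1
    have h2 : (s + i) % l.length = s + i - l.length := by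
      rw [Nat.mod_eq_sub_mod (by omega), Nat.mod_eq_of_lt (by omega)]
    omega

-- a found pattern index in the 26-letter alphabet is < 26
theorem pv_find_lt (p : List Char) (h : 0 ≤ PySem.Chars.find pvAlphaB p) :
    (PySem.Chars.find pvAlphaB p).toNat < 26 := by
  rcases p with _ | ⟨c, q⟩
  · rw [PySem.Chars.find_nil]; norm_num
  · have hp := (PySem.Chars.find_spec h).1
    have hlen := hp.length_le
    simp only [List.length_cons, List.length_drop] at hlen
    have h26 : pvAlphaB.length = 26 := by decide
    omega

-- mod of a cast
theorem pv_mod_cast (k : Nat) : PySem.Int.mod (k : Int) 26 = ((k % 26 : Nat) : Int) := by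
  rw [PySem.Int.mod_eq_emod_of_pos (by norm_num)]; push_cast; rfl

-- A's let-chain for one letter, as a named function used only by the proofs
def pvEncA (sw : List (String × String)) (base : List Char) (s : Int) (ch : Char) : List Char :=
  let ch2 := pvAApplyPlug [ch] sw
  let shifted := pvAShiftAlpha base s
  let idx := PySem.Chars.find pvAlphaA ch2
  let enc := (PySem.List.pyGet? shifted idx).getD 'A'
  pvAApplyPlug [enc] sw

def pvRecA (sw : List (String × String)) (base : List Char) : List Char → Int → List (List Char)
  | [], _ => []
  | c :: cs, s =>
    if !(pvAlphaA.contains c) then [c] :: pvRecA sw base cs s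
    else pvEncA sw base s c :: pvRecA sw base cs (s + 1)

-- the foldl with accumulator of port A equals the recursive description
theorem pv_foldA (sw : List (String × String)) (base : List Char) :
    ∀ (cs : List Char) (acc : List (List Char)) (s : Int),
      (cs.foldl (pvAStep sw base) (acc, s)).1 = acc ++ pvRecA sw base cs s := by
  intro cs
  induction cs with
  | nil => intro acc s; simp [pvRecA]
  | cons c cs ih =>
    intro acc s
    by_cases h : pvAlphaA.contains c
    · simp only [List.foldl_cons, pvAStep, pvRecA, h, Bool.not_true, Bool.false_eq_true,
        if_false]
      rw [ih]
      simp [pvEncA]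
    · simp only [List.foldl_cons, pvAStep, pvRecA, h, Bool.not_false, if_true]
      rw [ih]
      simp

-- one letter: A's rotor-slice encryption equals B's closed-form modular index
theorem pv_enc_eq (keyword : String) (sw : List (String × String)) (k : Nat) (c : Char)
    (hpre : PySem.Chars.isIn (pvPreImg sw c) pvAlphaPre = true) :
    pvEncA sw (pvBBase keyword) (k : Int) c = pvBEnc (pvBPlug sw) (pvBBase keyword) k c := by
  have hplug := pv_plug_eq sw c
  have hfind0 : 0 ≤ PySem.Chars.find pvAlphaB ((pvBPlug sw).getD (String.ofList [c]) [c]) := by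
    rw [PySem.Chars.find_nonneg_iff]
    rw [← pv_preimg_eq]
    rw [pv_alpha_pb] at hpre
    exact (PySem.Chars.isIn_iff_infix _ _).mp hpre
  set p := (pvBPlug sw).getD (String.ofList [c]) [c] with hp
  set idx := PySem.Chars.find pvAlphaB p with hidx
  have hlt : idx.toNat < 26 := pv_find_lt p hfind0
  have hL : 26 ≤ (pvBBase keyword).length := pv_base_len keyword
  set L := (pvBBase keyword).length with hLdef
  -- the indexed character agrees
  have hchar :
      (PySem.List.pyGet? (pvAShiftAlpha (pvBBase keyword) (k : Int)) idx).getD 'A'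
        = (PySem.List.pyGet? (pvBBase keyword)
            (PySem.Int.mod (idx + PySem.Int.mod (k : Int) 26) (L : Int))).getD 'A' := by
    have hs : (k % 26 : Nat) < 26 := Nat.mod_lt _ (by norm_num)
    -- A side
    have hA : pvAShiftAlpha (pvBBase keyword) (k : Int)
        = (pvBBase keyword).drop (k % 26) ++ (pvBBase keyword).take (k % 26) := by
      show PySem.List.slice (pvBBase keyword) (some (PySem.Int.mod (k : Int) 26)) none ++
          PySem.List.slice (pvBBase keyword) none (some (PySem.Int.mod (k : Int) 26)) = _
      rw [pv_mod_cast, PySem.List.slice_from_natCast, PySem.List.slice_to_natCast]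
    have hidxA : PySem.List.pyGet? (pvAShiftAlpha (pvBBase keyword) (k : Int)) idx
        = ((pvBBase keyword).drop (k % 26) ++ (pvBBase keyword).take (k % 26))[idx.toNat]? := by
      rw [hA, ← PySem.List.pyGet?_natCast, Int.toNat_of_nonneg hfind0]
    -- B side
    have hmod : PySem.Int.mod (idx + PySem.Int.mod (k : Int) 26) (L : Int)
        = (((idx.toNat + k % 26) % L : Nat) : Int) := by
      rw [pv_mod_cast]
      rw [show idx + ((k % 26 : Nat) : Int) = ((idx.toNat + k % 26 : Nat) : Int) by
        push_cast [Int.toNat_of_nonneg hfind0]; ring]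
      rw [PySem.Int.mod_eq_emod_of_pos (by exact_mod_cast Nat.lt_of_lt_of_le (by norm_num) hL)]
      push_cast; rfl
    rw [hidxA, hmod, PySem.List.pyGet?_natCast]
    rw [pv_rot (pvBBase keyword) (k % 26) idx.toNat (by omega) (by omega)]
    rw [Nat.add_comm]
  -- assemble
  show pvAApplyPlug [(PySem.List.pyGet? (pvAShiftAlpha (pvBBase keyword) (k : Int))
      (PySem.Chars.find pvAlphaA (pvAApplyPlug [c] sw))).getD 'A'] sw = _
  rw [hplug, pv_alpha_ab]
  rw [hchar]
  show _ = (pvBPlug sw).getD (String.ofList [_]) [_]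
  rw [pv_plug_eq]

-- the main induction: A's conditional scan = B's encrypt-then-merge, offset k
theorem pv_main (keyword : String) (sw : List (String × String)) :
    ∀ (cs : List Char) (k : Nat),
      (∀ c ∈ cs, pvAlphaPre.contains c = true →
          PySem.Chars.isIn (pvPreImg sw c) pvAlphaPre = true) →
      pvRecA sw (pvBBase keyword) cs (k : Int)
        = pvBMerge cs (((cs.filter (fun c => pvAlphaB.contains c)).zipIdx k).map
            (fun p => pvBEnc (pvBPlug sw) (pvBBase keyword) p.2 p.1)) := by
  intro cs
  induction cs with
  | nil => intro k _; simp [pvRecA, pvBMerge]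
  | cons c cs ih =>
    intro k hpre
    by_cases h : pvAlphaB.contains c
    · have hA : pvAlphaA.contains c = true := by rw [pv_alpha_ab]; exact h
      simp only [pvRecA, hA, Bool.not_true, Bool.false_eq_true, if_false,
        List.filter_cons, h, if_true, List.zipIdx_cons, List.map_cons, pvBMerge,
        List.headD_cons, List.tail_cons]
      refine List.cons_eq_cons.mpr ⟨?_, ?_⟩
      · exact pv_enc_eq keyword sw k c
          (hpre c (List.mem_cons_self) (by rw [pv_alpha_pb]; exact h))
      · rw [show (k : Int) + 1 = ((k + 1 : Nat) : Int) by push_cast; ring]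
        exact ih (k + 1) (fun c hc hl => hpre c (List.mem_cons_of_mem _ hc) hl)
    · have hB : pvAlphaB.contains c = false := by simpa using h
      have hA : pvAlphaA.contains c = false := by rw [pv_alpha_ab]; exact hB
      simp only [pvRecA, pvBMerge, List.filter_cons, hA, hB, Bool.not_false, if_true,
        Bool.false_eq_true, if_false]
      exact congrArg _ (ih k (fun c hc hl => hpre c (List.mem_cons_of_mem _ hc) hl))


-- ===== VERDICT (by name: the statement is the Claim_ definition above) =====
theorem enigma_keyword_encrypt_spec : Claim_equal_enigma_keyword_encrypt := by
  intro text keyword swaps _ hpre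
  have hpre' : ∀ c ∈ PySem.Chars.replace (PySem.Chars.upper text.toList) [' '] [],
      pvAlphaPre.contains c = true →
        PySem.Chars.isIn (pvPreImg (swaps.getD []) c) pvAlphaPre = true := by
    intro c hc hl
    have h := (List.all_eq_true.mp hpre) c hc
    rcases Bool.or_eq_true_iff.mp h with h' | h'
    · exact absurd hl (by simpa using h')
    · exact h'
  unfold Spec_enigma_keyword_encrypt enigma_keyword_encrypt enigma_keyword_encrypt_alt
  refine congrArg (fun l => String.ofList (PySem.Chars.join [] l)) ?_
  rw [pv_base_eq, pv_foldA, List.nil_append]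
  rw [show (0 : Int) = ((0 : Nat) : Int) from rfl]
  exact pv_main keyword (swaps.getD []) _ 0 hpre'
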